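-- pv_equiv track=rewrite | github.com/weleoka/discdex | dd_utils/dd_proc.py | stringify_list_of_tuples
-- ===== SOURCE A (Python) =====
-- def stringify_list_of_tuples(data, sorting_option):
--     """
--     Make strings from tuple pairs according to sorting order.
--     [1] Alphabetical order.
--     [2] Alphabetical order grouped by device name.
--
--     parameters:
--         data: list. A list of tuples to be stringified.
--         sorting_option: integer. The method of sorting.
--
--     return:
--         entries: list. A list of the stringified entries.
--         ticker: integer. A count of all the items listed.
--     """
--     ticker = 0  # Keep count of the number of entries.
--     entries = []
--
--     if sorting_option == "1":
--
--         for item in data: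
--             ticker += 1
--             entries.append("\n" + item[1] + "\t\t" + item[0])
--
--     elif sorting_option == "2":
--         current_location = data[0][0]
--         entries.append("\n\n\n" + current_location + "\n- - - - - - -")
--
--         for location in data:
--             ticker += 1
--
--             if current_location != location[0]:
--                 entries.append("\n\n\n" + location[0] + "\n- - - - - - -")
--                 current_location = location[0]
--
--             entries.append("\n" + location[1])
--
--     return entries, ticker
-- ===== SOURCE B (Python) =====
-- def stringify_list_of_tuples(data, sorting_option):
--     """Run-scanning re-implementation: option '1' is a comprehension; option '2'
--     walks the list with an index, cutting it into consecutive runs of equal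
--     location (header per run, then its members). Returns ([], 0) for empty data
--     under option '2' (where the original indexes data[0] and raises)."""
--     if sorting_option == "1":
--         return ["\n" + name + "\t\t" + loc for loc, name in data], len(data)
--     if sorting_option != "2":
--         return [], 0
--     entries = []
--     i, n = 0, len(data)
--     while i < n:
--         loc = data[i][0]
--         entries.append("\n\n\n" + loc + "\n- - - - - - -")
--         while i < n and data[i][0] == loc:
--             entries.append("\n" + data[i][1])
--             i += 1
--     return entries, n
-- ===== Notes on version B (the rewrite author's own statement) =====
-- stated objective: simpler
-- what changed: Replaced the stateful current_location change-detection loop (and per-item ticker) with an index-based run scanner that emits one header per consecutive run of equal locations, and a plain comprehension plus len(data) for option '1'.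
import Mathlib
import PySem

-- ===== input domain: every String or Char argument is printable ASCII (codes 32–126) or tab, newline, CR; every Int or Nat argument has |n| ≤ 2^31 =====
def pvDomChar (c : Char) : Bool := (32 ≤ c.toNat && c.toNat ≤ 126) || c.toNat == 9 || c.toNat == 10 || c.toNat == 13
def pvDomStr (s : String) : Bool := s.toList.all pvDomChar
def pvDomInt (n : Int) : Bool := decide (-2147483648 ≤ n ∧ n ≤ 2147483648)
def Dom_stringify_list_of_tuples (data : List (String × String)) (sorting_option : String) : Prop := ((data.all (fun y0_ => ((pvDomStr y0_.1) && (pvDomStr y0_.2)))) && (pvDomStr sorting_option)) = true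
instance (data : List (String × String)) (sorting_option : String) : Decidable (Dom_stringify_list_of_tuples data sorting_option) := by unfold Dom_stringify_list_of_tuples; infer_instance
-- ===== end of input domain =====

-- B replaces A's stateful current_location change-detection with an index-based
-- consecutive-run scanner (simpler decomposition); equal wherever A returns (Pre_ excludes
-- only empty data under option "2", where A raises IndexError).


-- ===== PORT A =====
-- the body of A's option-"2" for-loop: state = (entries, ticker, current_location)
def pvStepA (st : List String × Int × String) (loc : String × String) : List String × Int × String :=
  let t := st.2.1 + 1
  if st.2.2 ≠ loc.1 then
    (st.1 ++ ["\n\n\n" ++ loc.1 ++ "\n- - - - - - -", "\n" ++ loc.2], t, loc.1)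
  else
    (st.1 ++ ["\n" ++ loc.2], t, st.2.2)

def stringify_list_of_tuples (data : List (String × String)) (sorting_option : String) : List String × Int :=
  if sorting_option = "1" then
    data.foldl (fun (st : List String × Int) item =>
      (st.1 ++ ["\n" ++ item.2 ++ "\t\t" ++ item.1], st.2 + 1)) ([], 0)
  else if sorting_option = "2" then
    match data with
    | [] => ([], 0)  -- unreachable under Pre_: Python A raises IndexError at data[0][0]
    | (l0, _) :: _ =>
      let res := data.foldl pvStepA (["\n\n\n" ++ l0 ++ "\n- - - - - - -"], 0, l0)
      (res.1, res.2.1)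
  else ([], 0)

-- ===== PORT B =====
-- B's outer while loop over the remaining suffix: emit the run's header, then one line
-- per member of the consecutive run (the inner while = takeWhile), continue past the run
-- (dropWhile). fuel = length of the remaining list, a totality guard only.
def pvEmitGroupsF : Nat → List (String × String) → List String
  | _, [] => []
  | 0, _ :: _ => []  -- fuel exhausted: never reached when fuel ≥ list length
  | fuel + 1, (l, n) :: rest =>
    ("\n\n\n" ++ l ++ "\n- - - - - - -") ::
      ((((l, n) :: rest).takeWhile (fun p => p.1 == l)).map (fun p => "\n" ++ p.2) ++
       pvEmitGroupsF fuel (((l, n) :: rest).dropWhile (fun p => p.1 == l)))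

def stringify_list_of_tuples_alt (data : List (String × String)) (sorting_option : String) : List String × Int :=
  if sorting_option = "1" then
    (data.map (fun p => "\n" ++ p.2 ++ "\t\t" ++ p.1), (data.length : Int))
  else if sorting_option ≠ "2" then ([], 0)
  else (pvEmitGroupsF data.length data, (data.length : Int))

-- ===== PRECONDITION & SPEC =====
-- Pre_ excludes only empty data under option "2", where Python A raises IndexError.
def Pre_stringify_list_of_tuples (data : List (String × String)) (sorting_option : String) : Prop :=
  sorting_option = "2" → data ≠ []
instance (data : List (String × String)) (sorting_option : String) : Decidable (Pre_stringify_list_of_tuples data sorting_option) := by unfold Pre_stringify_list_of_tuples; infer_instance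
def pvWitness_stringify_list_of_tuples : (List (String × String)) × String :=
  ([("kitchen", "lamp"), ("kitchen", "fan"), ("hall", "tv")], "2")

def Spec_stringify_list_of_tuples (data : List (String × String)) (sorting_option : String) (out : List String × Int) : Prop := out = stringify_list_of_tuples_alt data sorting_option
instance (data : List (String × String)) (sorting_option : String) (out : List String × Int) : Decidable (Spec_stringify_list_of_tuples data sorting_option out) := by unfold Spec_stringify_list_of_tuples; infer_instance

-- ===== CLAIM (what is proved, stated in full; the proofs are below) =====
def Claim_equal_stringify_list_of_tuples : Prop := ∀ (data : List (String × String)) (sorting_option : String), Dom_stringify_list_of_tuples data sorting_option → Pre_stringify_list_of_tuples data sorting_option → Spec_stringify_list_of_tuples data sorting_option (stringify_list_of_tuples data sorting_option)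

-- ===== LEMMAS AND PROOFS =====

-- entries A's option-"2" loop appends while scanning `data` with current location c
def pvGEnt (c : String) : List (String × String) → List String
  | [] => []
  | (l, n) :: rest =>
    if c ≠ l then ("\n\n\n" ++ l ++ "\n- - - - - - -") :: ("\n" ++ n) :: pvGEnt l rest
    else ("\n" ++ n) :: pvGEnt c rest

theorem pvStepA_loop (data : List (String × String)) (e : List String) (t : Int) (c : String) :
    data.foldl pvStepA (e, t, c) =
      ((e ++ pvGEnt c data, t + data.length, (data.foldl pvStepA (e, t, c)).2.2)) := by
  induction data generalizing e t c with
  | nil => simp [pvGEnt]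
  | cons hd tl ih =>
    obtain ⟨l, n⟩ := hd
    by_cases h : c = l
    · subst h
      simp only [List.foldl_cons, pvStepA, ne_eq, not_true_eq_false, if_false]
      rw [ih]
      simp [pvGEnt]
      omega
    · simp only [List.foldl_cons, pvStepA, ne_eq, if_pos h]
      rw [ih]
      simp [pvGEnt, h]
      omega

theorem pvGEnt_eq (data : List (String × String)) (c : String) (fuel : Nat)
    (hf : (data.dropWhile (fun p => p.1 == c)).length ≤ fuel) :
    pvGEnt c data =
      (data.takeWhile (fun p => p.1 == c)).map (fun p => "\n" ++ p.2) ++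
        pvEmitGroupsF fuel (data.dropWhile (fun p => p.1 == c)) := by
  induction data generalizing c fuel with
  | nil => cases fuel <;> simp [pvGEnt, pvEmitGroupsF]
  | cons hd tl ih =>
    obtain ⟨l, n⟩ := hd
    by_cases h : c = l
    · subst h
      simp only [List.takeWhile_cons, List.dropWhile_cons, beq_self_eq_true, if_pos,
        List.map_cons, List.cons_append] at hf ⊢
      simp only [pvGEnt, ne_eq, not_true_eq_false, if_false]
      rw [ih _ fuel hf]
    · have hb : (((l, n) : String × String).1 == c) = false := by
        simp only [beq_eq_false_iff_ne, ne_eq]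
        exact fun hh => h hh.symm
      simp only [List.takeWhile_cons, List.dropWhile_cons, hb, Bool.false_eq_true, if_false,
        List.map_nil, List.nil_append] at hf ⊢
      simp only [pvGEnt, ne_eq, if_pos h]
      obtain ⟨fuel', rfl⟩ : ∃ f', fuel = f' + 1 := by
        cases fuel with
        | zero => simp at hf
        | succ f => exact ⟨f, rfl⟩
      rw [pvEmitGroupsF]
      simp only [List.takeWhile_cons, List.dropWhile_cons, beq_self_eq_true, if_pos,
        List.map_cons, List.cons_append]
      rw [ih l fuel']
      have := List.length_dropWhile_le (p := fun p : String × String => p.1 == l) tl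
      simp at hf
      omega

-- ===== VERDICT (by name: the statement is the Claim_ definition above) =====
theorem stringify_list_of_tuples_spec : Claim_equal_stringify_list_of_tuples := by
  intro data so _hdom hpre
  unfold Spec_stringify_list_of_tuples
  by_cases h1 : so = "1"
  · subst h1
    clear _hdom hpre
    simp only [stringify_list_of_tuples, stringify_list_of_tuples_alt, if_pos rfl]
    suffices h : ∀ (e : List String) (t : Int),
        data.foldl (fun (st : List String × Int) item =>
          (st.1 ++ ["\n" ++ item.2 ++ "\t\t" ++ item.1], st.2 + 1)) (e, t) =
        (e ++ data.map (fun p => "\n" ++ p.2 ++ "\t\t" ++ p.1), t + data.length) by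
      rw [h]; simp
    induction data with
    | nil => simp
    | cons hd tl ih =>
      intro e t
      simp only [List.foldl_cons]
      rw [ih]
      simp
      omega
  · by_cases h2 : so = "2"
    · subst h2
      match data, hpre rfl with
      | (l0, n0) :: rest, _ =>
        simp only [stringify_list_of_tuples, stringify_list_of_tuples_alt, if_neg h1,
          ne_eq, not_true_eq_false, if_false]
        rw [pvStepA_loop]
        refine Prod.ext ?_ ?_
        · show [_] ++ pvGEnt l0 ((l0, n0) :: rest) = pvEmitGroupsF _ ((l0, n0) :: rest)
          simp only [List.length_cons, pvEmitGroupsF, List.takeWhile_cons,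
            List.dropWhile_cons, beq_self_eq_true, if_pos, List.map_cons, List.cons_append]
          have hg := pvGEnt_eq ((l0, n0) :: rest) l0 rest.length (by
            simp only [List.dropWhile_cons, beq_self_eq_true, if_pos]
            exact List.length_dropWhile_le _ _)
          simp only [List.takeWhile_cons, List.dropWhile_cons, beq_self_eq_true, if_pos,
            List.map_cons, List.cons_append] at hg
          simp [hg]
        · show (0 : Int) + (((l0, n0) :: rest).length : Int) = _
          simp
    · simp [stringify_list_of_tuples, stringify_list_of_tuples_alt, h1, h2]
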